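-- pv_equiv track=rewrite | github.com/criskb/MKRShift_Nodes | xshader.py | _convert_ternary
-- ===== SOURCE A (Python) =====
-- def _find_top_level_char(text: str, target: str) -> int:
--     depth = 0
--     for idx, ch in enumerate(text):
--         if ch in "([{":
--             depth += 1
--         elif ch in ")]}":
--             depth = max(0, depth - 1)
--         elif ch == target and depth == 0:
--             return idx
--     return -1
--
-- def _find_ternary_colon(text: str, question_idx: int) -> int:
--     depth = 0
--     ternary_depth = 0
--     for idx in range(question_idx + 1, len(text)):
--         ch = text[idx]
--         if ch in "([{":
--             depth += 1
--         elif ch in ")]}":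
--             depth = max(0, depth - 1)
--         elif depth == 0:
--             if ch == "?":
--                 ternary_depth += 1
--             elif ch == ":":
--                 if ternary_depth == 0:
--                     return idx
--                 ternary_depth -= 1
--     return -1
--
-- def _convert_ternary(expr: str) -> str:
--     q_idx = _find_top_level_char(expr, "?")
--     if q_idx < 0:
--         return expr
--     c_idx = _find_ternary_colon(expr, q_idx)
--     if c_idx < 0:
--         return expr
--     cond = _convert_ternary(expr[:q_idx].strip())
--     if_true = _convert_ternary(expr[q_idx + 1 : c_idx].strip())
--     if_false = _convert_ternary(expr[c_idx + 1 :].strip())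
--     return f"where({cond}, {if_true}, {if_false})"
-- ===== SOURCE B (Python) =====
-- def _split_ternary(text: str):
--     """Single pass: find the first top-level '?' and its matching ':',
--     returning the three raw pieces, or None if there is no complete ternary."""
--     depth = 0
--     tern = 0
--     pre = None
--     cur = []
--     for i, ch in enumerate(text):
--         if ch in "([{":
--             depth += 1
--             cur.append(ch)
--         elif ch in ")]}":
--             depth = max(0, depth - 1)
--             cur.append(ch)
--         elif depth == 0 and ch == "?":
--             if pre is None:
--                 pre = "".join(cur)
--                 cur = []
--             else:
--                 tern += 1
--                 cur.append(ch)
--         elif depth == 0 and ch == ":" and pre is not None: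
--             if tern == 0:
--                 return pre, "".join(cur), text[i + 1:]
--             tern -= 1
--             cur.append(ch)
--         else:
--             cur.append(ch)
--     return None
--
-- def _convert_ternary(expr: str) -> str:
--     parts = _split_ternary(expr)
--     if parts is None:
--         return expr
--     cond, if_true, if_false = parts
--     return (
--         "where("
--         + _convert_ternary(cond.strip())
--         + ", "
--         + _convert_ternary(if_true.strip())
--         + ", "
--         + _convert_ternary(if_false.strip())
--         + ")"
--     )
-- ===== Notes on version B (the rewrite author's own statement) =====
-- stated objective: simpler
-- what changed: A locates the question mark and its matching colon with two separate index-returning scans and then slices the string by index; B makes a single accumulator pass that tracks bracket depth once and returns the three pieces of the ternary directly, with no index arithmetic and one helper instead of two.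
import Mathlib
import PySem

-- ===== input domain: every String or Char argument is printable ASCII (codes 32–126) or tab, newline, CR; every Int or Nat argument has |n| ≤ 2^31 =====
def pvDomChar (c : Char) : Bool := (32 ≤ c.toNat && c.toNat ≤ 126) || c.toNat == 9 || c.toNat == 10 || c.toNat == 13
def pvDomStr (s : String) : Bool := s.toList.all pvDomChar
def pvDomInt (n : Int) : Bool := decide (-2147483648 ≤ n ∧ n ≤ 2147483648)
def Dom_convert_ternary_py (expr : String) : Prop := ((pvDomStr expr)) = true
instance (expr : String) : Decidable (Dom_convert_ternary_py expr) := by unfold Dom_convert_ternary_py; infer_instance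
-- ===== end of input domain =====

-- B replaces A's two index-returning scans (find the question mark, then its colon) plus index slicing
-- by ONE accumulator pass that returns the three pieces directly; objective: simpler.

-- ch in "([{" / ch in ")]}"
def pvIsOpen (c : Char) : Bool := c == '(' || c == '[' || c == '{'
def pvIsClose (c : Char) : Bool := c == ')' || c == ']' || c == '}'

-- ===== PORT A =====
-- _find_top_level_char: 'for idx, ch in enumerate(text)' ported as recursion over the
-- remaining chars carrying idx; exact.
def findTopAux : List Char → Char → Int → Int → Int
  | [], _, _, _ => -1
  | c :: rest, target, idx, depth =>
    if pvIsOpen c then findTopAux rest target (idx + 1) (depth + 1)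
    else if pvIsClose c then findTopAux rest target (idx + 1) (max 0 (depth - 1))
    else if c == target && depth == 0 then idx
    else findTopAux rest target (idx + 1) depth

-- _find_ternary_colon's loop body, 'for idx in range(question_idx+1, len(text))';
-- recursion over the suffix carrying the absolute idx; exact.
def findColAux : List Char → Int → Int → Int → Int
  | [], _, _, _ => -1
  | c :: rest, idx, depth, tern =>
    if pvIsOpen c then findColAux rest (idx + 1) (depth + 1) tern
    else if pvIsClose c then findColAux rest (idx + 1) (max 0 (depth - 1)) tern
    else if depth == 0 then
      if c == '?' then findColAux rest (idx + 1) depth (tern + 1)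
      else if c == ':' then
        if tern == 0 then idx else findColAux rest (idx + 1) depth (tern - 1)
      else findColAux rest (idx + 1) depth tern
    else findColAux rest (idx + 1) depth tern

def find_ternary_colon (cs : List Char) (question_idx : Int) : Int :=
  findColAux (cs.drop (question_idx + 1).toNat) (question_idx + 1) 0 0

-- _convert_ternary; fuel (length+1) is a totality guard only: each recursive call is on a
-- strictly shorter string, so the 0-fuel branch is never reached from the entry point.
def convA : Nat → List Char → List Char
  | 0, cs => cs
  | fuel + 1, cs =>
    let q := findTopAux cs '?' 0 0
    if q < 0 then cs
    else
      let c := find_ternary_colon cs q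
      if c < 0 then cs
      else
        let cond := convA fuel (PySem.Chars.strip (PySem.List.slice cs none (some q)))
        let if_true := convA fuel (PySem.Chars.strip (PySem.List.slice cs (some (q + 1)) (some c)))
        let if_false := convA fuel (PySem.Chars.strip (PySem.List.slice cs (some (c + 1)) none))
        "where(".toList ++ cond ++ ", ".toList ++ if_true ++ ", ".toList ++ if_false ++ ")".toList

def convert_ternary_py (expr : String) : String :=
  String.ofList (convA (expr.toList.length + 1) expr.toList)

-- ===== PORT B =====
-- _split_ternary: one pass, state = (depth, tern, pre-part once '?' seen, current piece);
-- the Python's text[i+1:] is the recursion's remaining suffix; exact.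
def scanB : List Char → Int → Int → Option (List Char) → List Char →
    Option (List Char × List Char × List Char)
  | [], _, _, _, _ => none
  | c :: rest, depth, tern, pre, cur =>
    if pvIsOpen c then scanB rest (depth + 1) tern pre (cur ++ [c])
    else if pvIsClose c then scanB rest (max 0 (depth - 1)) tern pre (cur ++ [c])
    else if depth == 0 && c == '?' then
      match pre with
      | none => scanB rest depth tern (some cur) []
      | some p => scanB rest depth (tern + 1) (some p) (cur ++ [c])
    else if depth == 0 && c == ':' && pre.isSome then
      if tern == 0 then some (pre.getD [], cur, rest)
      else scanB rest depth (tern - 1) pre (cur ++ [c])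
    else scanB rest depth tern pre (cur ++ [c])

-- _convert_ternary (B); same fuel-as-totality-guard remark as for convA.
def convB : Nat → List Char → List Char
  | 0, cs => cs
  | fuel + 1, cs =>
    match scanB cs 0 0 none [] with
    | none => cs
    | some (cond, if_true, if_false) =>
        "where(".toList ++ convB fuel (PySem.Chars.strip cond) ++ ", ".toList ++
          convB fuel (PySem.Chars.strip if_true) ++ ", ".toList ++
          convB fuel (PySem.Chars.strip if_false) ++ ")".toList

def convert_ternary_py_alt (expr : String) : String :=
  String.ofList (convB (expr.toList.length + 1) expr.toList)

-- ===== PRECONDITION & SPEC =====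
def Spec_convert_ternary_py (expr : String) (out : String) : Prop := out = convert_ternary_py_alt expr
instance (expr : String) (out : String) : Decidable (Spec_convert_ternary_py expr out) := by unfold Spec_convert_ternary_py; infer_instance

-- ===== CLAIM (what is proved, stated in full; the proofs are below) =====
def Claim_equal_convert_ternary_py : Prop := ∀ (expr : String), Dom_convert_ternary_py expr → Spec_convert_ternary_py expr (convert_ternary_py expr)

-- ===== LEMMAS AND PROOFS =====

-- position-based ("Nat offset into the list") views of A's two scans
def fTop : List Char → Int → Option Nat
  | [], _ => none
  | c :: rest, depth =>
    if pvIsOpen c then (fTop rest (depth + 1)).map (· + 1)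
    else if pvIsClose c then (fTop rest (max 0 (depth - 1))).map (· + 1)
    else if depth == 0 && c == '?' then some 0
    else (fTop rest depth).map (· + 1)

def fCol : List Char → Int → Int → Option Nat
  | [], _, _ => none
  | c :: rest, depth, tern =>
    if pvIsOpen c then (fCol rest (depth + 1) tern).map (· + 1)
    else if pvIsClose c then (fCol rest (max 0 (depth - 1)) tern).map (· + 1)
    else if depth == 0 && c == '?' then (fCol rest depth (tern + 1)).map (· + 1)
    else if depth == 0 && c == ':' then
      if tern == 0 then some 0 else (fCol rest depth (tern - 1)).map (· + 1)
    else (fCol rest depth tern).map (· + 1)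

theorem elim_map_succ (o : Option Nat) (idx : Int) :
    ((o.map (· + 1) : Option Nat)).elim (-1 : Int) (fun k => idx + (k : Int)) =
      o.elim (-1) (fun k => (idx + 1) + (k : Int)) := by
  cases o with
  | none => simp
  | some v => simp only [Option.map_some, Option.elim]; push_cast; ring

theorem findTopAux_eq (cs : List Char) : ∀ idx depth,
    findTopAux cs '?' idx depth = (fTop cs depth).elim (-1) (fun k => idx + (k : Int)) := by
  induction cs with
  | nil => intro idx depth; simp [findTopAux, fTop]
  | cons c rest ih =>
    intro idx depth
    by_cases h1 : pvIsOpen c = true <;>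
      by_cases h2 : pvIsClose c = true <;>
        by_cases hd : (depth == 0) = true <;>
          by_cases hq : (c == '?') = true <;>
            simp only [findTopAux, fTop, h1, h2, hd, hq, Bool.true_and, Bool.false_and,
              Bool.and_true, Bool.and_false, Bool.false_eq_true, eq_self_iff_true, if_true, if_false] <;>
            first
              | (rw [elim_map_succ]; exact ih _ _)
              | simp

theorem findColAux_eq (cs : List Char) : ∀ idx depth tern,
    findColAux cs idx depth tern = (fCol cs depth tern).elim (-1) (fun k => idx + (k : Int)) := by
  induction cs with
  | nil => intro idx depth tern; simp [findColAux, fCol]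
  | cons c rest ih =>
    intro idx depth tern
    by_cases h1 : pvIsOpen c = true <;>
      by_cases h2 : pvIsClose c = true <;>
        by_cases hd : (depth == 0) = true <;>
          by_cases hq : (c == '?') = true <;>
            by_cases hc : (c == ':') = true <;>
              by_cases ht : (tern == 0) = true <;>
                simp only [findColAux, fCol, h1, h2, hd, hq, hc, ht, Bool.true_and, Bool.false_and,
                  Bool.and_true, Bool.and_false, Bool.false_eq_true, eq_self_iff_true, if_true, if_false] <;>
                first
                  | (rw [elim_map_succ]; exact ih _ _ _)
                  | simp

theorem map_succ_map_cons (o : Option Nat) (pre cur : List Char) (c : Char) (rest : List Char) :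
    (o.map (· + 1)).map (fun j => (pre, cur ++ (c :: rest).take j, (c :: rest).drop (j + 1)))
      = o.map (fun j => (pre, (cur ++ [c]) ++ rest.take j, rest.drop (j + 1))) := by
  cases o <;> simp

-- phase 2 of B's scan (after the first top-level '?') computes A's colon scan
theorem scanB_phase2 (cs : List Char) : ∀ depth tern pre cur,
    scanB cs depth tern (some pre) cur =
      (fCol cs depth tern).map (fun j => (pre, cur ++ cs.take j, cs.drop (j + 1))) := by
  induction cs with
  | nil => intro depth tern pre cur; simp [scanB, fCol]
  | cons c rest ih =>
    intro depth tern pre cur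
    by_cases h1 : pvIsOpen c = true <;>
      by_cases h2 : pvIsClose c = true <;>
        by_cases hd : (depth == 0) = true <;>
          by_cases hq : (c == '?') = true <;>
            by_cases hc : (c == ':') = true <;>
              by_cases ht : (tern == 0) = true <;>
                simp only [scanB, fCol, h1, h2, hd, hq, hc, ht, Option.isSome_some,
                  Bool.true_and, Bool.false_and, Bool.and_true, Bool.and_false,
                  Bool.false_eq_true, eq_self_iff_true, if_true, if_false] <;>
                first
                  | (rw [map_succ_map_cons]; exact ih _ _ _ _)
                  | simp

theorem elim_succ_cons (o : Option Nat) (cur : List Char) (c : Char) (rest : List Char) :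
    (o.map (· + 1)).elim none
        (fun k => scanB ((c :: rest).drop (k + 1)) 0 0 (some (cur ++ (c :: rest).take k)) [])
      = o.elim none (fun k => scanB (rest.drop (k + 1)) 0 0 (some ((cur ++ [c]) ++ rest.take k)) []) := by
  cases o <;> simp

-- phase 1 of B's scan computes A's top-level-'?' scan, then hands over to phase 2
theorem scanB_phase1 (cs : List Char) : ∀ depth cur,
    scanB cs depth 0 none cur =
      (fTop cs depth).elim none
        (fun k => scanB (cs.drop (k + 1)) 0 0 (some (cur ++ cs.take k)) []) := by
  induction cs with
  | nil => intro depth cur; simp [scanB, fTop]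
  | cons c rest ih =>
    intro depth cur
    by_cases h1 : pvIsOpen c = true <;>
      by_cases h2 : pvIsClose c = true <;>
        by_cases hd : (depth == 0) = true <;>
          by_cases hq : (c == '?') = true <;>
            simp only [scanB, fTop, h1, h2, hd, hq, Option.isSome_none, Bool.true_and,
              Bool.false_and, Bool.and_true, Bool.and_false, Bool.false_eq_true, eq_self_iff_true, if_true, if_false] <;>
            first
              | (rw [elim_succ_cons]; exact ih _ _)
              | (have hdz : depth = 0 := by simpa using hd
                 subst hdz; simp)
              | simp

theorem conv_eq : ∀ fuel cs, convA fuel cs = convB fuel cs := by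
  intro fuel
  induction fuel with
  | zero => intro cs; rfl
  | succ fuel ih =>
    intro cs
    simp only [convA, convB, find_ternary_colon]
    rw [scanB_phase1, findTopAux_eq]
    cases ht : fTop cs 0 with
    | none => simp
    | some k =>
      simp only [Option.elim]
      rw [scanB_phase2]
      have hk : ¬ ((0 : Int) + (k : Int) < 0) := by omega
      rw [if_neg hk]
      have htn : ((0 : Int) + (k : Int) + 1).toNat = k + 1 := by omega
      rw [htn, findColAux_eq]
      cases hc : fCol (cs.drop (k + 1)) 0 0 with
      | none => simp
      | some j =>
        simp only [Option.elim, Option.map_some]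
        have hcn : ¬ ((0 : Int) + (k : Int) + 1 + (j : Int) < 0) := by omega
        rw [if_neg hcn]
        have e1 : PySem.List.slice cs none (some ((0 : Int) + (k : Int))) = cs.take k := by
          rw [zero_add, PySem.List.slice_to_natCast]
        have e2 : PySem.List.slice cs (some ((0 : Int) + (k : Int) + 1))
            (some ((0 : Int) + (k : Int) + 1 + (j : Int))) = (cs.drop (k + 1)).take j := by
          have : (0 : Int) + (k : Int) + 1 = ((k + 1 : Nat) : Int) := by push_cast; ring
          rw [this, PySem.List.slice_natCast_add]
        have e3 : PySem.List.slice cs (some ((0 : Int) + (k : Int) + 1 + (j : Int) + 1)) none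
            = (cs.drop (k + 1)).drop (j + 1) := by
          have : (0 : Int) + (k : Int) + 1 + (j : Int) + 1 = ((k + 1 + (j + 1) : Nat) : Int) := by
            push_cast; ring
          rw [this, PySem.List.slice_from_natCast, List.drop_drop]
        rw [e1, e2, e3]
        simp [ih]

-- ===== VERDICT (by name: the statement is the Claim_ definition above) =====
theorem convert_ternary_py_spec : Claim_equal_convert_ternary_py := by
  intro expr _
  show convert_ternary_py expr = convert_ternary_py_alt expr
  unfold convert_ternary_py convert_ternary_py_alt
  rw [conv_eq]
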